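-- pv_equiv track=rewrite | github.com/nishantgupta83/GospelWisdom | gospel_scholar_agent/validators/chapter_validator.py | _calculate_chapter_quality
-- ===== SOURCE A (Python) =====
-- from typing import List, Dict, Optional
--
-- def _calculate_chapter_quality(verse_count_issues: List[Dict],
--                                metadata_score: int,
--                                num_sources: int) -> int:
--     """
--     Calculate overall chapter quality score (0-100).
--
--     Scoring breakdown:
--     - Verse count accuracy (40 pts)
--     - Metadata completeness (40 pts)
--     - Source coverage (20 pts)
--     """
--     # Verse count accuracy (0-40)
--     verse_score = 40
--     for issue in verse_count_issues:
--         if issue['severity'] == 'critical':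
--             verse_score -= 15
--         elif issue['severity'] == 'medium':
--             verse_score -= 8
--         else:  # low
--             verse_score -= 3
--     verse_score = max(0, verse_score)
--
--     # Metadata completeness (0-40)
--     metadata_points = int((metadata_score / 100) * 40)
--
--     # Source coverage (0-20)
--     if num_sources >= 3:
--         coverage_score = 20
--     elif num_sources == 2:
--         coverage_score = 15
--     elif num_sources == 1:
--         coverage_score = 10
--     else:
--         coverage_score = 0
--
--     total = verse_score + metadata_points + coverage_score
--     return min(100, total)
-- ===== SOURCE B (Python) =====
-- from typing import List, Dict
--
-- _PENALTY = {'critical': 15, 'medium': 8}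
--
-- def _calculate_chapter_quality(verse_count_issues: List[Dict],
--                                metadata_score: int,
--                                num_sources: int) -> int:
--     # Verse score by a short-circuiting recursive scorer with a penalty table:
--     # once the running score is exhausted (<= 0) the clamped result is 0
--     # regardless of the remaining issues (all penalties are positive), so we
--     # stop without looking at them. The max(0, ...) clamp disappears: it is
--     # folded into the stopping condition.
--     def verse(rem, s):
--         if s <= 0:
--             return 0
--         if not rem:
--             return s
--         return verse(rem[1:], s - _PENALTY.get(rem[0]['severity'], 3))
--
--     verse_score = verse(verse_count_issues, 40)
--     metadata_points = int((metadata_score / 100) * 40)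
--     if num_sources >= 3:
--         coverage_score = 20
--     elif num_sources == 2:
--         coverage_score = 15
--     elif num_sources == 1:
--         coverage_score = 10
--     else:
--         coverage_score = 0
--     return min(100, verse_score + metadata_points + coverage_score)
-- ===== Notes on version B (the rewrite author's own statement) =====
-- stated objective: alternative
-- what changed: The per-issue decrement loop followed by max(0,...) is replaced by a short-circuiting recursive scorer over a penalty table that stops as soon as the running score is exhausted (correct since every penalty is positive), folding the clamp into the stopping condition; metadata arithmetic, the coverage branch and the final min(100,...) are unchanged.
import Mathlib
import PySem

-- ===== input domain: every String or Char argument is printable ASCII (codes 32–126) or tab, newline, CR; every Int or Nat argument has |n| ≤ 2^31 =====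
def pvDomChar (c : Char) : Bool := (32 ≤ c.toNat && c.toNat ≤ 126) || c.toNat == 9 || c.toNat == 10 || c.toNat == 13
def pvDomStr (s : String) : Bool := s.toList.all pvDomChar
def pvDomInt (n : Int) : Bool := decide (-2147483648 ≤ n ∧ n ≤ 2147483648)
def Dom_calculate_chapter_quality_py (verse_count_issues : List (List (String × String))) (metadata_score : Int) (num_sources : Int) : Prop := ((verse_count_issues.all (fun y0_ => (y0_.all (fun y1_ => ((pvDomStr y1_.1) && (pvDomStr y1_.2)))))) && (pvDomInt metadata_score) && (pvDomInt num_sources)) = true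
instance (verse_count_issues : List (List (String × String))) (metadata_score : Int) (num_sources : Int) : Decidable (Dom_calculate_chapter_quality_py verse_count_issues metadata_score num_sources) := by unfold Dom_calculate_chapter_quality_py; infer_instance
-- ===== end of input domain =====

-- B replaces A's decrement-loop-then-clamp by a short-circuiting recursive scorer with a penalty table (stops once the score is exhausted); return-value equivalence, no mutation involved.


-- ===== PORT A =====
-- issue['severity'] is a dict lookup; under Pre_ the key is present, so getD's default is never used.
-- metadata_points: int((metadata_score / 100) * 40) equals truncating division (m*40) tdiv 100 exactly for |m| ≤ 2^31 (checked against CPython exhaustively on a wide range and at the bounds).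
def calculate_chapter_quality_py (verse_count_issues : List (List (String × String))) (metadata_score : Int) (num_sources : Int) : Int :=
  let verse_score : Int := verse_count_issues.foldl (fun s issue =>
    let sev := (PySem.Dict.ofList issue).getD "severity" ""
    if sev == "critical" then s - 15
    else if sev == "medium" then s - 8
    else s - 3) 40
  let verse_score := max 0 verse_score
  let metadata_points := Int.tdiv (metadata_score * 40) 100
  let coverage_score : Int :=
    if num_sources ≥ 3 then 20
    else if num_sources == 2 then 15
    else if num_sources == 1 then 10
    else 0
  min 100 (verse_score + metadata_points + coverage_score)

-- ===== PORT B =====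
-- Source B's module-level penalty table _PENALTY = {'critical': 15, 'medium': 8}
def pvPenaltyTable : PySem.Dict String Int := PySem.Dict.ofList [("critical", 15), ("medium", 8)]

-- Source B's inner recursive 'verse': short-circuits to 0 once the score is exhausted.
def pvVerse : List (List (String × String)) → Int → Int
  | rem, s =>
    if s ≤ 0 then 0
    else match rem with
      | [] => s
      | hd :: tl => pvVerse tl (s - pvPenaltyTable.getD ((PySem.Dict.ofList hd).getD "severity" "") 3)

def calculate_chapter_quality_py_alt (verse_count_issues : List (List (String × String))) (metadata_score : Int) (num_sources : Int) : Int :=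
  let verse_score := pvVerse verse_count_issues 40
  let metadata_points := Int.tdiv (metadata_score * 40) 100
  let coverage_score : Int :=
    if num_sources ≥ 3 then 20
    else if num_sources == 2 then 15
    else if num_sources == 1 then 10
    else 0
  min 100 (verse_score + metadata_points + coverage_score)

-- ===== PRECONDITION & SPEC =====
-- Pre_ excludes exactly the inputs on which Python A raises KeyError: an issue dict without the 'severity' key.
def Pre_calculate_chapter_quality_py (verse_count_issues : List (List (String × String))) (metadata_score : Int) (num_sources : Int) : Prop :=
  ∀ issue ∈ verse_count_issues, (PySem.Dict.ofList issue).contains "severity" = true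
instance (verse_count_issues : List (List (String × String))) (metadata_score : Int) (num_sources : Int) : Decidable (Pre_calculate_chapter_quality_py verse_count_issues metadata_score num_sources) := by unfold Pre_calculate_chapter_quality_py; infer_instance
def pvWitness_calculate_chapter_quality_py : (List (List (String × String))) × Int × Int :=
  ([[("severity", "critical")], [("severity", "low")]], 75, 2)

def Spec_calculate_chapter_quality_py (verse_count_issues : List (List (String × String))) (metadata_score : Int) (num_sources : Int) (out : Int) : Prop := out = calculate_chapter_quality_py_alt verse_count_issues metadata_score num_sources
instance (verse_count_issues : List (List (String × String))) (metadata_score : Int) (num_sources : Int) (out : Int) : Decidable (Spec_calculate_chapter_quality_py verse_count_issues metadata_score num_sources out) := by unfold Spec_calculate_chapter_quality_py; infer_instance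

-- ===== CLAIM =====
def Claim_equal_calculate_chapter_quality_py : Prop := ∀ (verse_count_issues : List (List (String × String))) (metadata_score : Int) (num_sources : Int), Dom_calculate_chapter_quality_py verse_count_issues metadata_score num_sources → Pre_calculate_chapter_quality_py verse_count_issues metadata_score num_sources → Spec_calculate_chapter_quality_py verse_count_issues metadata_score num_sources (calculate_chapter_quality_py verse_count_issues metadata_score num_sources)

-- ===== LEMMAS AND PROOFS =====
-- B's table lookup in closed form.
theorem pvTable_getD (k : String) : pvPenaltyTable.getD k 3 = if k = "critical" then (15:Int) else if k = "medium" then 8 else 3 := by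
  have h : pvPenaltyTable = (PySem.Dict.empty.insert "critical" 15).insert "medium" 8 := by decide
  rw [h, PySem.Dict.getD_insert, PySem.Dict.getD_insert]
  by_cases h1 : k = "critical" <;> by_cases h2 : k = "medium" <;> simp [h1, h2, PySem.Dict.getD_empty]

-- A's per-issue penalty equals B's table lookup (both 15 / 8 / 3).
theorem pvPenalty_eq (issue : List (String × String)) :
    (let sev := (PySem.Dict.ofList issue).getD "severity" ""
     if sev == "critical" then (15 : Int) else if sev == "medium" then 8 else 3)
    = pvPenaltyTable.getD ((PySem.Dict.ofList issue).getD "severity" "") 3 := by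
  rw [pvTable_getD]
  simp

-- B's penalties are positive.
theorem pvPenalty_pos (issue : List (String × String)) :
    0 < pvPenaltyTable.getD ((PySem.Dict.ofList issue).getD "severity" "") 3 := by
  rw [pvTable_getD]
  split_ifs <;> norm_num

-- A's fold subtracts the total penalty.
theorem pvFoldA (l : List (List (String × String))) (s : Int) :
    l.foldl (fun s issue =>
      let sev := (PySem.Dict.ofList issue).getD "severity" ""
      if sev == "critical" then s - 15
      else if sev == "medium" then s - 8
      else s - 3) s
    = s - (l.map (fun issue => pvPenaltyTable.getD ((PySem.Dict.ofList issue).getD "severity" "") 3)).sum := by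
  induction l generalizing s with
  | nil => simp
  | cons hd tl ih =>
    simp only [List.foldl_cons, List.map_cons, List.sum_cons, ih]
    have := pvPenalty_eq hd
    dsimp only at this ⊢
    split_ifs at this ⊢ <;> omega

-- B's short-circuiting recursion computes the clamped closed form.
theorem pvVerse_eq (l : List (List (String × String))) (s : Int) :
    pvVerse l s = max 0 (s - (l.map (fun issue => pvPenaltyTable.getD ((PySem.Dict.ofList issue).getD "severity" "") 3)).sum) := by
  induction l generalizing s with
  | nil =>
    rw [pvVerse]
    simp only [List.map_nil, List.sum_nil, sub_zero]
    split_ifs with h <;> omega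
  | cons hd tl ih =>
    rw [pvVerse]
    simp only [List.map_cons, List.sum_cons]
    have hsum : 0 ≤ (tl.map (fun issue => pvPenaltyTable.getD ((PySem.Dict.ofList issue).getD "severity" "") 3)).sum := by
      apply List.sum_nonneg
      intro x hx
      obtain ⟨i, _, rfl⟩ := List.mem_map.mp hx
      exact le_of_lt (pvPenalty_pos i)
    have hp := pvPenalty_pos hd
    split_ifs with h
    · omega
    · rw [ih]; omega

-- ===== VERDICT =====
theorem calculate_chapter_quality_py_spec : Claim_equal_calculate_chapter_quality_py := by
  intro vs m ns _ _
  unfold Spec_calculate_chapter_quality_py calculate_chapter_quality_py calculate_chapter_quality_py_alt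
  simp only [pvFoldA, pvVerse_eq]
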